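-- pv_equiv track=rewrite | github.com/mnyu123/PCCP | Day5/Day5_live/PCCP3_write.py | get_genes
-- ===== SOURCE A (Python) =====
-- def get_genes(generation, order):
--     # 1세대는 무조건 Rr
--     if generation == 1:
--         return 'Rr'
--
--     # 규칙성
--
--     # 1세대 2세대 3세대  4세대
--     # 0123 4567 891011 12131415
--
--     # 이럴때 보면 4로 나누고 몫에 1을 더하면 부모가 몇세대인지 알 수있음
--     # 이 내용으로 밑에 한줄식 parent_order를 만든거임
--
--     parent_order = (((order-1)//4) + 1)  # 나의 부모의 위치를 알 수있음
--
--     # 부모의 유전자형을 알 수 있는 내용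
--     # generation-1 이게 윗 세대를 말함(부모면 부모의 부모 느낌스)
--     parent = get_genes(generation-1, parent_order)
--
--     if parent == 'RR' or parent == 'rr':
--         return parent
--
--     # parent가 Rr 인 경우
--     if order % 4 == 0:
--         return 'rr'
--     elif order % 4 == 1:
--         return 'RR'
--     else:
--         return 'Rr'
-- ===== SOURCE B (Python) =====
-- def get_genes(generation, order):
--     # Build the order chain from the current position up toward generation 2.
--     chain = []
--     g, o = generation, order
--     while g > 1:
--         chain.append(o)
--         o = ((o - 1) // 4) + 1
--         g -= 1
--     # Scan from the generation-2 end downward: the earliest decisive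
--     # order (o % 4 in {0, 1}) fixes the genotype for all descendants.
--     for v in reversed(chain):
--         if v % 4 == 1:
--             return 'RR'
--         if v % 4 == 0:
--             return 'rr'
--     return 'Rr'
-- ===== Notes on version B (the rewrite author's own statement) =====
-- stated objective: alternative
-- what changed: Replaces the Mendelian recursion with an explicit iterative build of the parent-order chain followed by a forward scan from the generation-2 end that returns at the first decisive order.
import Mathlib
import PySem

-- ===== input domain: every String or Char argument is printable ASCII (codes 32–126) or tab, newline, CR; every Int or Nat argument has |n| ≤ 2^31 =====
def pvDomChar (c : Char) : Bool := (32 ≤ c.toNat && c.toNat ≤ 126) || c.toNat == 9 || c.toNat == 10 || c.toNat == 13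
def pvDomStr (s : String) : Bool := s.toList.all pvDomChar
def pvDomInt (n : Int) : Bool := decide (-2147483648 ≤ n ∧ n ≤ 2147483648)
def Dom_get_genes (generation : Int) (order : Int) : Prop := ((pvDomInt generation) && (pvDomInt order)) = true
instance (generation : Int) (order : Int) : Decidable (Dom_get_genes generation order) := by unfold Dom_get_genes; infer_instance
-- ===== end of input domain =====

-- B replaces A's recursion with an iterative chain build plus a scan from the generation-2 end; equal on generation ≥ 1.
-- ===== PORT A =====
-- A recurses with generation-1 until generation == 1; fuel = generation.toNat counts exactly
-- those steps (for generation ≥ 1 the fuel is never exhausted; generation ≤ 0 is outside Pre_).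
def get_genes_go (fuel : Nat) (generation : Int) (order : Int) : String :=
  match fuel with
  | 0 => "Rr"  -- unreachable when 1 ≤ generation
  | Nat.succ f =>
    if generation == 1 then "Rr"
    else
      let parent_order := PySem.Int.floordiv (order - 1) 4 + 1
      let parent := get_genes_go f (generation - 1) parent_order
      if parent == "RR" || parent == "rr" then parent
      else if PySem.Int.mod order 4 == 0 then "rr"
      else if PySem.Int.mod order 4 == 1 then "RR"
      else "Rr"

def get_genes (generation : Int) (order : Int) : String :=
  get_genes_go generation.toNat generation order

-- ===== PORT B =====
-- while g > 1: chain.append(o); o = ((o-1)//4)+1; g -= 1   — the loop runs (generation-1).toNat times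
def get_genes_chain (steps : Nat) (o : Int) : List Int :=
  match steps with
  | 0 => []
  | Nat.succ n => o :: get_genes_chain n (PySem.Int.floordiv (o - 1) 4 + 1)

-- for v in reversed(chain): first decisive order wins
def get_genes_scan (l : List Int) : String :=
  match l with
  | [] => "Rr"
  | v :: rest =>
    if PySem.Int.mod v 4 == 1 then "RR"
    else if PySem.Int.mod v 4 == 0 then "rr"
    else get_genes_scan rest

def get_genes_alt (generation : Int) (order : Int) : String :=
  get_genes_scan (get_genes_chain (generation - 1).toNat order).reverse

-- ===== PRECONDITION & SPEC =====
-- Pre_: the Python A recurses on generation-1 with only 'generation == 1' as base case,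
-- so it never returns for generation ≤ 0 (unbounded recursion → RecursionError).
def Pre_get_genes (generation : Int) (order : Int) : Prop := 1 ≤ generation
instance (generation : Int) (order : Int) : Decidable (Pre_get_genes generation order) := by unfold Pre_get_genes; infer_instance
def pvWitness_get_genes : Int × Int := (3, 7)

def Spec_get_genes (generation : Int) (order : Int) (out : String) : Prop := out = get_genes_alt generation order
instance (generation : Int) (order : Int) (out : String) : Decidable (Spec_get_genes generation order out) := by unfold Spec_get_genes; infer_instance

-- ===== CLAIM (what is proved, stated in full; the proofs are below) =====
def Claim_equal_get_genes : Prop := ∀ (generation : Int) (order : Int), Dom_get_genes generation order → Pre_get_genes generation order → Spec_get_genes generation order (get_genes generation order)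

-- ===== LEMMAS AND PROOFS =====

-- one-step unfolding of A's recursion (fuel left as a variable so rw unfolds exactly once)
lemma go_succ (f : Nat) (g o : Int) :
    get_genes_go (f + 1) g o =
      (if g == 1 then "Rr"
       else
         let parent := get_genes_go f (g - 1) (PySem.Int.floordiv (o - 1) 4 + 1)
         if parent == "RR" || parent == "rr" then parent
         else if PySem.Int.mod o 4 == 0 then "rr"
         else if PySem.Int.mod o 4 == 1 then "RR"
         else "Rr") := rfl

-- Scanning l ++ [o]: the verdict of l (from the generation-2 end) takes precedence.
lemma scan_append (l : List Int) (o : Int) :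
    get_genes_scan (l ++ [o]) =
      (if get_genes_scan l == "RR" || get_genes_scan l == "rr" then get_genes_scan l
       else if PySem.Int.mod o 4 == 1 then "RR"
       else if PySem.Int.mod o 4 == 0 then "rr"
       else "Rr") := by
  induction l with
  | nil => simp only [List.nil_append, get_genes_scan]; rfl
  | cons v rest ih =>
    simp only [List.cons_append, get_genes_scan]
    by_cases h1 : PySem.Int.mod v 4 = 1
    · rw [beq_iff_eq.mpr h1]
      simp
    · rw [beq_eq_false_iff_ne.mpr h1]
      by_cases h0 : PySem.Int.mod v 4 = 0
      · rw [beq_iff_eq.mpr h0]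
        simp
      · rw [beq_eq_false_iff_ne.mpr h0]
        simpa using ih

-- Core invariant: with fuel n+1 and generation n+1, A equals B's scan of the reversed chain of n orders.
lemma go_eq_scan (n : Nat) (g o : Int) (hg : g = (n : Int) + 1) :
    get_genes_go (n + 1) g o = get_genes_scan (get_genes_chain n o).reverse := by
  induction n generalizing g o with
  | zero =>
    subst hg
    simp only [get_genes_chain, List.reverse_nil, get_genes_scan, go_succ]
    norm_num
  | succ m ih =>
    subst hg
    rw [go_succ, beq_eq_false_iff_ne.mpr (show ((m + 1 : Nat) : Int) + 1 ≠ 1 by push_cast; omega)]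
    simp only [Bool.false_eq_true, if_false]
    have harg : ((m + 1 : Nat) : Int) + 1 - 1 = (m : Int) + 1 := by push_cast; ring
    rw [harg, ih ((m : Int) + 1) (PySem.Int.floordiv (o - 1) 4 + 1) rfl]
    simp only [get_genes_chain, List.reverse_cons]
    rw [scan_append]
    set r := get_genes_scan (get_genes_chain m (PySem.Int.floordiv (o - 1) 4 + 1)).reverse with hr
    by_cases hd : (r == "RR" || r == "rr") = true
    · rw [if_pos hd, if_pos hd]
    · rw [if_neg hd, if_neg hd]
      by_cases h1 : PySem.Int.mod o 4 = 1
      · rw [beq_iff_eq.mpr h1, beq_eq_false_iff_ne.mpr (show PySem.Int.mod o 4 ≠ 0 by omega)]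
        simp
      · rw [beq_eq_false_iff_ne.mpr h1]
        by_cases h0 : PySem.Int.mod o 4 = 0
        · rw [beq_iff_eq.mpr h0]
          simp
        · rw [beq_eq_false_iff_ne.mpr h0]
          simp

-- ===== VERDICT (by name: the statement is the Claim_ definition above) =====
theorem get_genes_spec : Claim_equal_get_genes := by
  intro generation order _ hpre
  have h1 : 1 ≤ generation := hpre
  unfold Spec_get_genes get_genes get_genes_alt
  have hn : generation.toNat = (generation - 1).toNat + 1 := by omega
  rw [hn, go_eq_scan ((generation - 1).toNat) generation order (by omega)]
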